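-- pv_equiv track=rewrite | github.com/Myeonghan-Jeong/algorithm-programmers | greedy_search/mock_test.py | solution
-- ===== SOURCE A (Python) =====
-- def solution(answers):
--     # answer patterns
--     p1 = [1, 2, 3, 4, 5]
--     p2 = [2, 1, 2, 3, 2, 4, 2, 5]
--     p3 = [3, 3, 1, 1, 2, 2, 4, 4, 5, 5]
--
--     # count got questions right
--     i, j, k = 0, 0, 0
--     for a in range(len(answers)):
--         if answers[a] == p1[a % len(p1)]:
--             i += 1
--         if answers[a] == p2[a % len(p2)]:
--             j += 1
--         if answers[a] == p3[a % len(p3)]: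
--             k += 1
--
--     ans = []
--     if i == max(i, j, k):
--         ans.append(1)
--     if j == max(i, j, k):
--         ans.append(2)
--     if k == max(i, j, k):
--         ans.append(3)
--
--     return ans
-- ===== SOURCE B (Python) =====
-- def solution(answers):
--     # One pass over the answers builds a frequency table keyed by
--     # (index mod 40, answer); 40 = lcm(5, 8, 10), the patterns' common period.
--     counts = {}
--     for idx, a in enumerate(answers):
--         key = (idx % 40, a)
--         counts[key] = counts.get(key, 0) + 1
--     patterns = [
--         [1, 2, 3, 4, 5],
--         [2, 1, 2, 3, 2, 4, 2, 5],
--         [3, 3, 1, 1, 2, 2, 4, 4, 5, 5],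
--     ]
--     # Each pattern's score is a fixed 40-term sum of table lookups.
--     scores = [sum(counts.get((r, p[r % len(p)]), 0) for r in range(40))
--               for p in patterns]
--     best = max(scores)
--     return [i + 1 for i, s in enumerate(scores) if s == best]
-- ===== Notes on version B (the rewrite author's own statement) =====
-- stated objective: alternative
-- what changed: B builds a frequency table keyed by (index mod 40, answer) in one pass over the answers (40 = lcm of the pattern lengths), then scores each pattern as a fixed 40-term sum of table lookups and filters the maximal indices, instead of A's per-answer modulo comparison against each pattern with three running counters and an if-chain over max.
import Mathlib
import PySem

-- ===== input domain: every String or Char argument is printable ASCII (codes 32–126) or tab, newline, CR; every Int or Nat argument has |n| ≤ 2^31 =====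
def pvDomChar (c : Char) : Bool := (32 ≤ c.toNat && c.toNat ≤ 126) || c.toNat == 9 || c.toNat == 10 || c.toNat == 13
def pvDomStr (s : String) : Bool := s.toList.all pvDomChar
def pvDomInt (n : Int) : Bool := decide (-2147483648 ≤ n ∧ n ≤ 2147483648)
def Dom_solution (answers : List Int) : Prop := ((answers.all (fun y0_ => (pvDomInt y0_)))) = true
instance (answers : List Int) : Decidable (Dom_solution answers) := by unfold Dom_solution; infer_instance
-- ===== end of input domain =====

-- B builds one frequency table keyed by (index mod 40, answer) (40 = lcm of the pattern
-- lengths) and scores each pattern by 40 table lookups, instead of A's per-answer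
-- comparisons with three running counters; same O(n) cost, return value proved equal.

-- ===== PORT A =====
def solution (answers : List Int) : List Int :=
  let p1 : List Int := [1, 2, 3, 4, 5]
  let p2 : List Int := [2, 1, 2, 3, 2, 4, 2, 5]
  let p3 : List Int := [3, 3, 1, 1, 2, 2, 4, 4, 5, 5]
  let st : Int × Int × Int :=
    (PySem.List.pyRange 0 (PySem.List.len answers) 1).foldl
      (fun (s : Int × Int × Int) a =>
        let s1 := if PySem.List.pyGetD answers a 0 == PySem.List.pyGetD p1 (PySem.Int.mod a (PySem.List.len p1)) 0 then s.1 + 1 else s.1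
        let s2 := if PySem.List.pyGetD answers a 0 == PySem.List.pyGetD p2 (PySem.Int.mod a (PySem.List.len p2)) 0 then s.2.1 + 1 else s.2.1
        let s3 := if PySem.List.pyGetD answers a 0 == PySem.List.pyGetD p3 (PySem.Int.mod a (PySem.List.len p3)) 0 then s.2.2 + 1 else s.2.2
        (s1, s2, s3)) (0, 0, 0)
  let i := st.1
  let j := st.2.1
  let k := st.2.2
  let ans : List Int := []
  let ans := if i == max i (max j k) then ans ++ [1] else ans
  let ans := if j == max i (max j k) then ans ++ [2] else ans
  let ans := if k == max i (max j k) then ans ++ [3] else ans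
  ans

-- ===== PORT B =====
def solution_alt (answers : List Int) : List Int :=
  let counts : PySem.Dict (Int × Int) Int :=
    (PySem.List.enumerate answers 0).foldl
      (fun d ia =>
        d.insert (PySem.Int.mod ia.1 40, ia.2) (d.getD (PySem.Int.mod ia.1 40, ia.2) 0 + 1))
      PySem.Dict.empty
  let patterns : List (List Int) :=
    [[1, 2, 3, 4, 5], [2, 1, 2, 3, 2, 4, 2, 5], [3, 3, 1, 1, 2, 2, 4, 4, 5, 5]]
  let scores := patterns.map (fun p =>
    ((PySem.List.pyRange 0 40 1).map
        (fun r => counts.getD (r, PySem.List.pyGetD p (PySem.Int.mod r (PySem.List.len p)) 0) 0)).sum)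
  let best := (PySem.List.max? scores (fun x => x)).getD 0
  ((PySem.List.enumerate scores 0).filter (fun is => is.2 == best)).map (fun is => is.1 + 1)

-- ===== PRECONDITION & SPEC =====
def Spec_solution (answers : List Int) (out : List Int) : Prop := out = solution_alt answers
instance (answers : List Int) (out : List Int) : Decidable (Spec_solution answers out) := by unfold Spec_solution; infer_instance

-- ===== CLAIM (what is proved, stated in full; the proofs are below) =====
def Claim_equal_solution : Prop := ∀ (answers : List Int), Dom_solution answers → Spec_solution answers (solution answers)

-- ===== LEMMAS AND PROOFS =====

-- the 40-term indicator sum collapses to the single residue c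
theorem pvIndSum (c x : Int) (p : List Int) (h0 : 0 ≤ c) (h40 : c < 40) :
    ((PySem.List.pyRange 0 40 1).map
        (fun r => if ((c, x) == (r, PySem.List.pyGetD p (PySem.Int.mod r (PySem.List.len p)) 0))
          then (1 : Int) else 0)).sum =
      if x == PySem.List.pyGetD p (PySem.Int.mod c (PySem.List.len p)) 0 then 1 else 0 := by
  rw [PySem.List.sum_map_ite_one_zero]
  by_cases hx : (x == PySem.List.pyGetD p (PySem.Int.mod c (PySem.List.len p)) 0) = true
  · have : (PySem.List.pyRange 0 40 1).countP
        (fun r => ((c, x) == (r, PySem.List.pyGetD p (PySem.Int.mod r (PySem.List.len p)) 0)))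
        = (PySem.List.pyRange 0 40 1).count c := by
      apply List.countP_congr
      intro r _
      simp only [beq_iff_eq] at hx
      by_cases hrc : r = c
      · subst hrc; simp [hx]
      · have hcr : c ≠ r := Ne.symm hrc
        simp [hcr, hrc]
    rw [this, List.count_eq_one_of_mem (by decide)
      ((PySem.List.mem_pyRange_one).mpr ⟨h0, h40⟩)]
    simp only [beq_iff_eq, PySem.List.len_eq] at hx
    simp [hx]
  · have : (PySem.List.pyRange 0 40 1).countP
        (fun r => ((c, x) == (r, PySem.List.pyGetD p (PySem.Int.mod r (PySem.List.len p)) 0))) = 0 := by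
      apply List.countP_eq_zero.mpr
      intro r _
      simp only [beq_iff_eq] at hx ⊢
      simp only [Prod.mk.injEq, not_and]
      intro h; subst h; exact fun h2 => hx h2
    rw [this]
    simp only [beq_iff_eq, PySem.List.len_eq] at hx
    simp [hx]

-- B's 40-lookup score over the (idx % 40, answer) key list equals the direct match count
theorem pvSumCount (p : List Int) (hdvd : (PySem.List.len p) ∣ 40)
    (hpos : 0 < PySem.List.len p) :
    ∀ (xs : List Int) (s : Int), 0 ≤ s →
    ((PySem.List.pyRange 0 40 1).map
        (fun r => (((PySem.List.enumerate xs s).map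
            (fun ia => (PySem.Int.mod ia.1 40, ia.2))).count
              (r, PySem.List.pyGetD p (PySem.Int.mod r (PySem.List.len p)) 0) : Int))).sum =
      ((PySem.List.enumerate xs s).countP
        (fun ia => ia.2 == PySem.List.pyGetD p (PySem.Int.mod ia.1 (PySem.List.len p)) 0) : Int) := by
  intro xs
  induction xs with
  | nil => intro s _; simp [PySem.List.enumerate_nil]
  | cons x t ih =>
    intro s hs
    rw [PySem.List.enumerate_cons]
    simp only [List.map_cons, List.count_cons, List.countP_cons]
    push_cast
    rw [PySem.List.sum_map_add_int, ih (s + 1) (by omega)]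
    have hmm : PySem.Int.mod (PySem.Int.mod s 40) (PySem.List.len p)
        = PySem.Int.mod s (PySem.List.len p) := by
      rw [PySem.Int.mod_eq_emod_of_pos (by omega : (0:Int) < 40),
          PySem.Int.mod_eq_emod_of_pos hpos, PySem.Int.mod_eq_emod_of_pos hpos]
      exact Int.emod_emod_of_dvd s hdvd
    rw [pvIndSum (PySem.Int.mod s 40) x p
        (PySem.Int.mod_nonneg s (by omega)) (PySem.Int.mod_lt s (by omega)), hmm]

-- one B score, stated on the port's counter dict, as A's countP over the index range
theorem pvScoreEq (answers p : List Int) (hdvd : (PySem.List.len p) ∣ 40)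
    (hpos : 0 < PySem.List.len p) :
    ((PySem.List.pyRange 0 40 1).map
        (fun r => ((PySem.List.enumerate answers 0).foldl
            (fun d ia =>
              d.insert (PySem.Int.mod ia.1 40, ia.2) (d.getD (PySem.Int.mod ia.1 40, ia.2) 0 + 1))
            (PySem.Dict.empty : PySem.Dict (Int × Int) Int)).getD
          (r, PySem.List.pyGetD p (PySem.Int.mod r (PySem.List.len p)) 0) 0)).sum =
      ((PySem.List.pyRange 0 (PySem.List.len answers) 1).countP
        (fun a => PySem.List.pyGetD answers a 0 ==
          PySem.List.pyGetD p (PySem.Int.mod a (PySem.List.len p)) 0) : Int) := by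
  have hfold : ∀ r,
      ((PySem.List.enumerate answers 0).foldl
          (fun d ia =>
            d.insert (PySem.Int.mod ia.1 40, ia.2) (d.getD (PySem.Int.mod ia.1 40, ia.2) 0 + 1))
          (PySem.Dict.empty : PySem.Dict (Int × Int) Int)).getD
        (r, PySem.List.pyGetD p (PySem.Int.mod r (PySem.List.len p)) 0) 0 =
      (((PySem.List.enumerate answers 0).map
          (fun ia => (PySem.Int.mod ia.1 40, ia.2))).count
        (r, PySem.List.pyGetD p (PySem.Int.mod r (PySem.List.len p)) 0) : Int) := by
    have hfuse : ∀ (l : List (Int × Int)) (d : PySem.Dict (Int × Int) Int),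
        l.foldl (fun d ia =>
            d.insert (PySem.Int.mod ia.1 40, ia.2) (d.getD (PySem.Int.mod ia.1 40, ia.2) 0 + 1)) d
        = (l.map (fun ia => (PySem.Int.mod ia.1 40, ia.2))).foldl
            (fun d x => d.insert x (d.getD x 0 + 1)) d := by
      intro l
      induction l with
      | nil => intro d; rfl
      | cons h t ih => intro d; simp only [List.foldl_cons, List.map_cons]; exact ih _
    intro r
    rw [hfuse, PySem.Dict.getD_foldl_insert_add_one]
    simp [PySem.Dict.empty, PySem.Dict.getD, PySem.Dict.get?]
  simp only [hfold]
  rw [pvSumCount p hdvd hpos answers 0 le_rfl]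
  rw [PySem.List.enumerate_eq_map_pyRange (d := 0), List.countP_map]
  rfl

-- the selection tail: A's if-chain equals B's filter-map over enumerate [i,j,k]
set_option maxRecDepth 10000 in
theorem pvTailEq (i j k : Int) :
    (let ans : List Int := []
     let ans := if i == max i (max j k) then ans ++ [1] else ans
     let ans := if j == max i (max j k) then ans ++ [2] else ans
     let ans := if k == max i (max j k) then ans ++ [3] else ans
     ans) =
    (((PySem.List.enumerate [i, j, k] 0).filter
        (fun is => is.2 == (PySem.List.max? [i, j, k] (fun x => x)).getD 0)).map
        (fun is => is.1 + 1)) := by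
  simp only [PySem.List.enumerate_cons, PySem.List.enumerate_nil, PySem.List.max?_id_cons,
    List.foldl, Option.getD_some]
  simp only [List.filter_cons, List.filter_nil]
  simp only [max_assoc]
  by_cases h1 : (i == max i (max j k)) = true <;> by_cases h2 : (j == max i (max j k)) = true <;>
    by_cases h3 : (k == max i (max j k)) = true <;> simp [h1, h2, h3]

-- ===== VERDICT (by name: the statement is the Claim_ definition above) =====
theorem solution_spec : Claim_equal_solution := by
  intro answers _
  show solution answers = solution_alt answers
  unfold solution solution_alt
  simp only [List.map]
  rw [pvScoreEq answers [1,2,3,4,5] (by decide) (by decide),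
      pvScoreEq answers [2,1,2,3,2,4,2,5] (by decide) (by decide),
      pvScoreEq answers [3,3,1,1,2,2,4,4,5,5] (by decide) (by decide)]
  rw [PySem.List.foldl_prod_mk
      (f := fun (acc : Int) a => if PySem.List.pyGetD answers a 0 == PySem.List.pyGetD [1,2,3,4,5] (PySem.Int.mod a (PySem.List.len [1,2,3,4,5])) 0 then acc + 1 else acc)
      (g := fun (s : Int × Int) a =>
        (if PySem.List.pyGetD answers a 0 == PySem.List.pyGetD [2,1,2,3,2,4,2,5] (PySem.Int.mod a (PySem.List.len [2,1,2,3,2,4,2,5])) 0 then s.1 + 1 else s.1,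
         if PySem.List.pyGetD answers a 0 == PySem.List.pyGetD [3,3,1,1,2,2,4,4,5,5] (PySem.Int.mod a (PySem.List.len [3,3,1,1,2,2,4,4,5,5])) 0 then s.2 + 1 else s.2))]
  rw [PySem.List.foldl_prod_mk
      (f := fun (acc : Int) a => if PySem.List.pyGetD answers a 0 == PySem.List.pyGetD [2,1,2,3,2,4,2,5] (PySem.Int.mod a (PySem.List.len [2,1,2,3,2,4,2,5])) 0 then acc + 1 else acc)
      (g := fun (acc : Int) a => if PySem.List.pyGetD answers a 0 == PySem.List.pyGetD [3,3,1,1,2,2,4,4,5,5] (PySem.Int.mod a (PySem.List.len [3,3,1,1,2,2,4,4,5,5])) 0 then acc + 1 else acc)]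
  rw [PySem.List.foldl_if_add_one, PySem.List.foldl_if_add_one, PySem.List.foldl_if_add_one]
  simp only [zero_add]
  exact pvTailEq _ _ _
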